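-- pv_equiv track=rewrite | github.com/ParkJaechang/Coil-Analyzing | src/field_analysis/validation_retune_catalog.py | _catalog_filters
-- ===== SOURCE A (Python) =====
-- from typing import Any
--
-- def _catalog_filters(entries: list[dict[str, Any]]) -> dict[str, Any]:
--     def values(field: str) -> list[str]:
--         return sorted({str(item.get(field)) for item in entries if item.get(field) not in (None, "")})
--
--     return {
--         "status": values("status"),
--         "quality_label": values("quality_label"),
--         "candidate_status": values("candidate_status"),
--         "target_output_type": values("target_output_type"),
--         "source_kind": values("source_kind"),
--         "exact_path": values("exact_path"),
--         "waveform_type": values("waveform_type"),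
--     }
-- ===== SOURCE B (Python) =====
-- FIELDS = (
--     "status", "quality_label", "candidate_status", "target_output_type",
--     "source_kind", "exact_path", "waveform_type",
-- )
--
-- def _catalog_filters(entries):
--     # one pass over entries collecting (field, value) pairs, then group per field
--     pairs = [(f, str(item.get(f))) for item in entries for f in FIELDS
--              if item.get(f) not in (None, "")]
--     index = {f: [] for f in FIELDS}
--     for f, v in pairs:
--         index[f].append(v)
--     return {f: sorted(set(index[f])) for f in FIELDS}
-- ===== Notes on version B (the rewrite author's own statement) =====
-- stated objective: alternative
-- what changed: A scans the entries list once per field (seven set-comprehension passes); B makes one pass over entries collecting (field, value) pairs, groups them into a per-field index dict, and sorts each group.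
import Mathlib
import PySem

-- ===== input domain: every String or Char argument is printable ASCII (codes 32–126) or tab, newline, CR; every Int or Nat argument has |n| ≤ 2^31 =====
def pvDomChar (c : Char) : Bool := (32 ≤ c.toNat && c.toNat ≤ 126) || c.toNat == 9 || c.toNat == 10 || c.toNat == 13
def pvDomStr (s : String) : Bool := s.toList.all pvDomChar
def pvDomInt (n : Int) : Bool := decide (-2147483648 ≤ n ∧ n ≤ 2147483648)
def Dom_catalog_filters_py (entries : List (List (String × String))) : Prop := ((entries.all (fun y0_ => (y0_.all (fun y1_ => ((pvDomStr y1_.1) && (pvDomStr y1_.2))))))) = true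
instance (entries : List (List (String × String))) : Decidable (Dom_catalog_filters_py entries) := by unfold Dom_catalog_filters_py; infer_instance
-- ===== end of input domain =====

-- B replaces A's seven per-field scans of the entries by ONE pass collecting (field, value)
-- pairs, grouped into an index dict and sorted per field (objective: alternative decomposition).

-- ===== PORT A =====
-- sorted({str(item.get(field)) for item in entries if item.get(field) not in (None, "")})
-- (values are strings here, so str(item.get(field)) is the value itself on the kept items)
def pvValuesA (entries : List (List (String × String))) (field : String) : List String :=
  PySem.List.sorted
    (PySem.Set.ofList (entries.filterMap (fun item =>
      match (PySem.Dict.mk item).get? field with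
      | some v => if v == "" then none else some v
      | none   => none)))
    (fun x => x) false

def catalog_filters_py (entries : List (List (String × String))) : List (String × List String) :=
  [("status", pvValuesA entries "status"),
   ("quality_label", pvValuesA entries "quality_label"),
   ("candidate_status", pvValuesA entries "candidate_status"),
   ("target_output_type", pvValuesA entries "target_output_type"),
   ("source_kind", pvValuesA entries "source_kind"),
   ("exact_path", pvValuesA entries "exact_path"),
   ("waveform_type", pvValuesA entries "waveform_type")]

-- ===== PORT B =====
def pvFields : List String :=
  ["status", "quality_label", "candidate_status", "target_output_type",
   "source_kind", "exact_path", "waveform_type"]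

-- one clause of B's comprehension: the (field, value) pair item contributes for field f, if any
def pvExtract (item : List (String × String)) (f : String) : Option (String × String) :=
  match (PySem.Dict.mk item).get? f with
  | some v => if v == "" then none else some (f, v)
  | none   => none

-- index[f].append(v): every f in pairs is in FIELDS, so the key is always present and
-- Dict.modify with default [] is exact for Python's index[f].append(v)
def pvPairs (entries : List (List (String × String))) : List (String × String) :=
  entries.flatMap (fun item => pvFields.filterMap (pvExtract item))

def pvIndex (entries : List (List (String × String))) : PySem.Dict String (List String) :=
  (pvPairs entries).foldl (fun d p => d.modify p.1 [] (· ++ [p.2]))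
    (pvFields.foldl (fun d f => d.insert f ([] : List String)) PySem.Dict.empty)

def catalog_filters_py_alt (entries : List (List (String × String))) : List (String × List String) :=
  pvFields.map (fun f =>
    (f, PySem.List.sorted (PySem.Set.ofList ((pvIndex entries).getD f [])) (fun x => x) false))

-- ===== PRECONDITION & SPEC =====
def Spec_catalog_filters_py (entries : List (List (String × String))) (out : List (String × List String)) : Prop := out = catalog_filters_py_alt entries
instance (entries : List (List (String × String))) (out : List (String × List String)) : Decidable (Spec_catalog_filters_py entries out) := by unfold Spec_catalog_filters_py; infer_instance

-- ===== CLAIM (what is proved, stated in full; the proofs are below) =====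
def Claim_equal_catalog_filters_py : Prop := ∀ (entries : List (List (String × String))), Dom_catalog_filters_py entries → Spec_catalog_filters_py entries (catalog_filters_py entries)

-- ===== LEMMAS AND PROOFS =====

-- a pair extracted for field f carries f as its first component
lemma pvExtract_fst (item : List (String × String)) (f : String) (p : String × String)
    (h : pvExtract item f = some p) : p.1 = f := by
  unfold pvExtract at h
  cases hh : (PySem.Dict.mk item).get? f <;> simp [hh] at h
  rw [← h.2]

-- grouping B's pair stream by a field f that occurs exactly once in fields
-- yields exactly A's per-field extraction for that item
lemma pvGroup_item (item : List (String × String)) (f : String)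
    (fields : List String) (hnd : fields.Nodup) (hf : f ∈ fields) :
    ((fields.filterMap (pvExtract item)).filter (fun p => p.1 == f)).map (fun p => p.2)
      = (match (PySem.Dict.mk item).get? f with
         | some v => if v == "" then none else some v
         | none   => none).toList := by
  induction fields with
  | nil => simp at hf
  | cons g gs ih =>
    rcases List.nodup_cons.mp hnd with ⟨hg, hnd'⟩
    simp only [List.filterMap_cons]
    by_cases hgf : g = f
    · subst hgf
      unfold pvExtract
      have hrest : ∀ (a b x : String), x ∈ gs →
          (match (PySem.Dict.mk item).get? x with
            | some v => if v = "" then none else some (x, v)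
            | none => none) = some (a, b) → ¬a = g := by
        intro a b x hx hab
        have hax : a = x := by
          cases hx2 : (PySem.Dict.mk item).get? x with
          | none => rw [hx2] at hab; simp at hab
          | some w =>
            rw [hx2] at hab
            by_cases hw : w = ""
            · simp [hw] at hab
            · simp [hw] at hab; exact hab.1.symm
        subst hax
        exact fun h => hg (h ▸ hx)
      cases hh : (PySem.Dict.mk item).get? g with
      | none => simp; exact hrest
      | some v =>
        by_cases hv : v == ""
        · simp [hv]; exact hrest
        · simp [hv]; exact hrest
    · have hf' : f ∈ gs := by
        cases List.mem_cons.mp hf with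
        | inl h => exact absurd h.symm hgf
        | inr h => exact h
      cases h : pvExtract item g with
      | none => exact ih hnd' hf'
      | some p =>
        have hp1 : p.1 = g := pvExtract_fst item g p h
        simp only [List.filter_cons]
        have : (p.1 == f) = false := by simp [hp1, hgf]
        simp [this, ih hnd' hf']

-- grouping all of B's pairs at field f gives A's filterMap over entries
lemma pvGroup_all (entries : List (List (String × String))) (f : String)
    (hf : f ∈ pvFields) :
    ((pvPairs entries).filter (fun p => p.1 == f)).map (fun p => p.2)
      = entries.filterMap (fun item =>
          match (PySem.Dict.mk item).get? f with
          | some v => if v == "" then none else some v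
          | none   => none) := by
  unfold pvPairs
  induction entries with
  | nil => simp
  | cons item rest ih =>
    simp only [List.flatMap_cons, List.filter_append, List.map_append, ih,
      List.filterMap_cons]
    rw [pvGroup_item item f pvFields (by decide) hf]
    cases h : (PySem.Dict.mk item).get? f with
    | none => simp
    | some v => by_cases hv : v == "" <;> simp [hv]

-- B's index at a field f of FIELDS holds exactly A's extracted value list
lemma pvIndex_getD (entries : List (List (String × String))) (f : String)
    (hf : f ∈ pvFields)
    (h0 : (pvFields.foldl (fun d g => d.insert g ([] : List String)) PySem.Dict.empty).getD f [] = []) :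
    (pvIndex entries).getD f []
      = entries.filterMap (fun item =>
          match (PySem.Dict.mk item).get? f with
          | some v => if v == "" then none else some v
          | none   => none) := by
  unfold pvIndex
  rw [PySem.Dict.getD_foldl_modify_append, h0, pvGroup_all entries f hf]
  simp

-- ===== VERDICT (by name: the statement is the Claim_ definition above) =====
theorem catalog_filters_py_spec : Claim_equal_catalog_filters_py := by
  intro entries _
  show catalog_filters_py entries = catalog_filters_py_alt entries
  unfold catalog_filters_py catalog_filters_py_alt pvValuesA
  simp only [pvFields, List.map_cons, List.map_nil]
  rw [pvIndex_getD entries "status" (by decide) (by decide),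
      pvIndex_getD entries "quality_label" (by decide) (by decide),
      pvIndex_getD entries "candidate_status" (by decide) (by decide),
      pvIndex_getD entries "target_output_type" (by decide) (by decide),
      pvIndex_getD entries "source_kind" (by decide) (by decide),
      pvIndex_getD entries "exact_path" (by decide) (by decide),
      pvIndex_getD entries "waveform_type" (by decide) (by decide)]
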